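-- pv_equiv track=rewrite | github.com/DrakeAlia/Graphs | projects/ancestor/ancestor.py | has_parents
-- ===== SOURCE A (Python) =====
-- def has_parents(ancestors,node):
--     children = set()
--     for parent, child in ancestors:
--         children.add(child)
--     if node in children:
--         return True
--     else:
--         return False
-- ===== SOURCE B (Python) =====
-- def has_parents(ancestors, node):
--     # Structural recursion on the edge list: empty list has no children;
--     # otherwise the head edge's child matches, or recurse on the tail.
--     if not ancestors:
--         return False
--     parent, child = ancestors[0]
--     if child == node:
--         return True
--     return has_parents(ancestors[1:], node)
-- ===== Notes on version B (the rewrite author's own statement) =====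
-- stated objective: alternative
-- what changed: B replaces A's iterative build-a-set-of-all-children-then-membership-test with a direct structural recursion on the edge list (base case empty list, head-check, recurse on the tail), maintaining no auxiliary structure and short-circuiting on the first match.
import Mathlib
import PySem

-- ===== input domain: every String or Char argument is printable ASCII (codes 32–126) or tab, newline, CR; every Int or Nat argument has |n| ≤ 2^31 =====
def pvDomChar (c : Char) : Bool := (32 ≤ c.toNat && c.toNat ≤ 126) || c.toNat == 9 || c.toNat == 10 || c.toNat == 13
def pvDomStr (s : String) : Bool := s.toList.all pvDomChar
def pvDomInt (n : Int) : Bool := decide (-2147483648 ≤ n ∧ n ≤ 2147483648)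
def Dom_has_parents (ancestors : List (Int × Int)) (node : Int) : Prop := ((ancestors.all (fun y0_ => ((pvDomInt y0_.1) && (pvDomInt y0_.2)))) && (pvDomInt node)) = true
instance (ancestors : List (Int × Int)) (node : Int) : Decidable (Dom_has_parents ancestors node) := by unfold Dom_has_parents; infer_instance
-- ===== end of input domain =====

-- B replaces A's build-a-child-set-then-membership-test with a direct structural recursion on the edge list (alternative decomposition).


-- ===== PORT A =====
def has_parents (ancestors : List (Int × Int)) (node : Int) : Bool :=
  let children : PySem.Set Int :=
    ancestors.foldl (fun s pc => PySem.Set.add s pc.2) PySem.Set.empty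
  if PySem.Set.contains children node then true else false

-- ===== PORT B =====
def has_parents_alt (ancestors : List (Int × Int)) (node : Int) : Bool :=
  match ancestors with
  | [] => false
  | (_, child) :: rest =>
      if child == node then true
      else has_parents_alt rest node

-- ===== PRECONDITION & SPEC =====
def Spec_has_parents (ancestors : List (Int × Int)) (node : Int) (out : Bool) : Prop := out = has_parents_alt ancestors node
instance (ancestors : List (Int × Int)) (node : Int) (out : Bool) : Decidable (Spec_has_parents ancestors node out) := by unfold Spec_has_parents; infer_instance

-- ===== CLAIM =====
def Claim_equal_has_parents : Prop := ∀ (ancestors : List (Int × Int)) (node : Int), Dom_has_parents ancestors node → Spec_has_parents ancestors node (has_parents ancestors node)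

-- ===== LEMMAS AND PROOFS =====

theorem contains_foldl_add (l : List (Int × Int)) (s : PySem.Set Int) (node : Int) :
    PySem.Set.contains (l.foldl (fun s pc => PySem.Set.add s pc.2) s) node
      = (PySem.Set.contains s node || has_parents_alt l node) := by
  induction l generalizing s with
  | nil => simp [has_parents_alt]
  | cons hd tl ih =>
      obtain ⟨p, c⟩ := hd
      simp only [List.foldl_cons, ih]
      by_cases h : c = node
      · subst h
        simp [has_parents_alt, PySem.Set.contains, PySem.Set.mem_add]
      · have h1 : ¬ node = c := fun hh => h hh.symm
        simp [has_parents_alt, PySem.Set.contains, PySem.Set.mem_add, h, h1]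

-- ===== VERDICT =====
theorem has_parents_spec : Claim_equal_has_parents := by
  intro ancestors node _
  unfold Spec_has_parents has_parents
  simp only [contains_foldl_add]
  simp [PySem.Set.empty, PySem.Set.contains]
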